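-- pv_equiv track=rewrite | github.com/utkarshranaa/rewindo | lib/rewindo.py | _filter_diff_by_file
-- ===== SOURCE A (Python) =====
-- from typing import Optional, List, Dict, Any
--
-- def _filter_diff_by_file(diff_lines: List[str], file_path: str) -> List[str]:
--     """Filter diff lines to only show changes for a specific file."""
--     result = []
--     in_target_file = False
--
--     for line in diff_lines:
--         # Check for diff header
--         if line.startswith("diff --git"):
--             if file_path in line:
--                 in_target_file = True
--                 result.append(line)
--             else:
--                 in_target_file = False
--         elif in_target_file:
--             result.append(line)
--
--     return result
-- ===== SOURCE B (Python) =====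
-- def _filter_diff_by_file(diff_lines, file_path):
--     """Group the diff into per-file segments, then keep the segments whose
--     'diff --git' header mentions file_path."""
--     segments = []
--     i, n = 0, len(diff_lines)
--     while i < n:
--         if diff_lines[i].startswith("diff --git"):
--             j = i + 1
--             while j < n and not diff_lines[j].startswith("diff --git"):
--                 j += 1
--             segments.append(diff_lines[i:j])
--             i = j
--         else:
--             i += 1
--     return [line for seg in segments if file_path in seg[0] for line in seg]
-- ===== Notes on version B (the rewrite author's own statement) =====
-- stated objective: alternative
-- what changed: Replaces the stateful single pass with an in_target_file flag by a group-then-filter decomposition: first split the diff into per-file segments starting at each 'diff --git' header, then concatenate the segments whose header mentions file_path.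
import Mathlib
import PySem

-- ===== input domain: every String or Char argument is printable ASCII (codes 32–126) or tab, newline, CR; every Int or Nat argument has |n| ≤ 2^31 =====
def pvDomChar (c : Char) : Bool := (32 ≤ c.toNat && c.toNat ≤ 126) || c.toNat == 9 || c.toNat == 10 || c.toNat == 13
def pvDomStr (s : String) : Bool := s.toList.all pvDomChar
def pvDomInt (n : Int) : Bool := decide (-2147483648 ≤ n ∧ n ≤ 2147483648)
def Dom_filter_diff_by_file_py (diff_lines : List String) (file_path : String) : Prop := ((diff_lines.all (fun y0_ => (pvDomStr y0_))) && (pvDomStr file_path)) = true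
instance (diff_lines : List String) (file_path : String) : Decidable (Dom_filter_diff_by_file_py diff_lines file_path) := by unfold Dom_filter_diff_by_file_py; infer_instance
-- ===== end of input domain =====

-- B replaces A's stateful single pass (in_target_file flag) by a group-then-filter
-- decomposition: split into per-file segments, then keep the matching segments ("alternative").

-- ===== PORT A =====
-- single pass with a boolean flag, accumulating into result
def filter_diff_by_file_py (diff_lines : List String) (file_path : String) : List String :=
  (diff_lines.foldl
    (fun (st : List String × Bool) line =>
      if PySem.Str.startswith line "diff --git" then
        if PySem.Str.isIn file_path line then (st.1 ++ [line], true)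
        else (st.1, false)
      else if st.2 then (st.1 ++ [line], st.2)
      else st)
    ([], false)).1

-- ===== PORT B =====
def pvIsHeader (l : String) : Bool := PySem.Str.startswith l "diff --git"

-- the outer while loop of Source B: each header opens a segment that runs until the next header;
-- the inner 'while j < n and not header' scan-and-slice is the takeWhile/dropWhile pair
def pvSegments : List String → List (List String)
  | [] => []
  | l :: ls =>
    if pvIsHeader l then
      (l :: ls.takeWhile (fun x => !pvIsHeader x)) ::
        pvSegments (ls.dropWhile (fun x => !pvIsHeader x))
    else pvSegments ls
termination_by ls => ls.length
decreasing_by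
  · exact Nat.lt_succ_of_le (List.length_dropWhile_le _ _)
  · exact Nat.lt_succ_self _

def filter_diff_by_file_py_alt (diff_lines : List String) (file_path : String) : List String :=
  ((pvSegments diff_lines).filter
      (fun seg => PySem.Str.isIn file_path (seg.headD ""))).flatten

-- ===== PRECONDITION & SPEC =====
def Spec_filter_diff_by_file_py (diff_lines : List String) (file_path : String) (out : List String) : Prop := out = filter_diff_by_file_py_alt diff_lines file_path
instance (diff_lines : List String) (file_path : String) (out : List String) : Decidable (Spec_filter_diff_by_file_py diff_lines file_path out) := by unfold Spec_filter_diff_by_file_py; infer_instance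

-- ===== CLAIM (what is proved, stated in full; the proofs are below) =====
def Claim_equal_filter_diff_by_file_py : Prop := ∀ (diff_lines : List String) (file_path : String), Dom_filter_diff_by_file_py diff_lines file_path → Spec_filter_diff_by_file_py diff_lines file_path (filter_diff_by_file_py diff_lines file_path)

-- ===== LEMMAS AND PROOFS =====

-- A's loop as a structural recursion on the remaining lines, parameterised by the flag
def pvRunA (fp : String) (b : Bool) : List String → List String
  | [] => []
  | l :: ls =>
    if pvIsHeader l then
      (if PySem.Str.isIn fp l then l :: pvRunA fp true ls else pvRunA fp false ls)
    else if b then l :: pvRunA fp b ls else pvRunA fp b ls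

theorem pvFoldl_eq_runA (fp : String) (ls : List String) (acc : List String) (b : Bool) :
    (ls.foldl
      (fun (st : List String × Bool) line =>
        if PySem.Str.startswith line "diff --git" then
          if PySem.Str.isIn fp line then (st.1 ++ [line], true)
          else (st.1, false)
        else if st.2 then (st.1 ++ [line], st.2)
        else st)
      (acc, b)).1 = acc ++ pvRunA fp b ls := by
  induction ls generalizing acc b with
  | nil => simp [pvRunA]
  | cons l ls ih =>
    simp only [List.foldl_cons, pvRunA, pvIsHeader]
    by_cases h : PySem.Str.startswith l "diff --git" = true
    · simp only [if_pos h]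
      by_cases hin : PySem.Str.isIn fp l = true
      · simp only [if_pos hin, ih]; simp
      · simp only [if_neg hin, Bool.not_eq_true] at *
        simp only [hin, Bool.false_eq_true, if_neg, ih]
    · simp only [if_neg h]
      cases b with
      | true =>
        simp only [show ((acc, true) : List String × Bool).2 = true from rfl, if_pos rfl, ih]
        simp
      | false =>
        simp only [show ((acc, false) : List String × Bool).2 = false from rfl,
          Bool.false_eq_true, if_neg, ih]
        simp

-- in the false state, non-header lines are simply skipped
theorem pvRunA_false_dropWhile (fp : String) (ls : List String) :
    pvRunA fp false ls = pvRunA fp false (ls.dropWhile (fun x => !pvIsHeader x)) := by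
  induction ls with
  | nil => rfl
  | cons l ls ih =>
    by_cases h : pvIsHeader l = true
    · simp [List.dropWhile, h]
    · simp only [pvRunA, h, Bool.false_eq_true, if_neg, List.dropWhile]
      simp [h, ih]

-- in the true state, lines up to the next header are copied, then the false state resumes
theorem pvRunA_true_split (fp : String) (ls : List String) :
    pvRunA fp true ls =
      ls.takeWhile (fun x => !pvIsHeader x) ++
        pvRunA fp false (ls.dropWhile (fun x => !pvIsHeader x)) := by
  induction ls with
  | nil => rfl
  | cons l ls ih =>
    by_cases h : pvIsHeader l = true
    · simp only [pvRunA, h, if_pos rfl, List.takeWhile, List.dropWhile]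
      simp [h, pvRunA]
    · simp only [pvRunA, h, Bool.false_eq_true, if_neg, List.takeWhile, List.dropWhile]
      simp [h, ih]

-- the false-state run is exactly B's group-then-filter result
theorem pvRunA_false_eq_alt (fp : String) (ls : List String) :
    pvRunA fp false ls =
      ((pvSegments ls).filter (fun seg => PySem.Str.isIn fp (seg.headD ""))).flatten := by
  induction hn : ls.length using Nat.strong_induction_on generalizing ls with
  | _ n ih =>
  cases ls with
  | nil => simp [pvRunA, pvSegments]
  | cons l ls =>
    by_cases h : pvIsHeader l = true
    · rw [pvSegments]
      have hrec := ih (ls.dropWhile (fun x => !pvIsHeader x)).length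
          (by subst hn; simp only [List.length_cons, Nat.lt_succ_iff]
              exact List.length_dropWhile_le _ _) _ rfl
      by_cases hin : PySem.Str.isIn fp l = true
      · simp only [pvRunA, h, hin, eq_self_iff_true, if_true, pvRunA_true_split, hrec,
          List.filter_cons, List.headD_cons, List.flatten_cons]
        simp
      · simp only [Bool.not_eq_true] at hin
        simp only [pvRunA, h, hin, eq_self_iff_true, if_true, Bool.false_eq_true, if_false,
          List.filter_cons, List.headD_cons, List.flatten_cons]
        rw [pvRunA_false_dropWhile, hrec]
    · rw [pvSegments, if_neg (by simp [h])]
      simp only [pvRunA, h, Bool.false_eq_true, if_neg]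
      exact ih ls.length (by subst hn; simp) _ rfl

-- ===== VERDICT (by name: the statement is the Claim_ definition above) =====
theorem filter_diff_by_file_py_spec : Claim_equal_filter_diff_by_file_py := by
  intro diff_lines file_path _
  unfold Spec_filter_diff_by_file_py filter_diff_by_file_py filter_diff_by_file_py_alt
  rw [pvFoldl_eq_runA, pvRunA_false_eq_alt]
  simp
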